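-- pv_equiv track=rewrite | github.com/heijp06/MIU | miu.py | replace_rule
-- ===== SOURCE A (Python) =====
-- from typing import Iterator, Optional
--
-- def replace_rule(string: str, pattern: str, replacement: str) -> Iterator[str]:
--     start = 0
--     while start < len(string):
--         start = string.find(pattern, start)
--         if start < 0:
--             break
--         yield string[:start] + replacement + string[start + len(pattern):]
--         start += 1
-- ===== SOURCE B (Python) =====
-- from typing import Iterator, Optional
--
-- def replace_rule(string: str, pattern: str, replacement: str) -> Iterator[str]:
--     m = len(pattern)
--     if m == 0:
--         for i in range(len(string)):
--             yield string[:i] + replacement + string[i:]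
--         return
--     masks = {}
--     for k, c in enumerate(pattern):
--         masks[c] = masks.get(c, 0) | (1 << k)
--     goal = 1 << (m - 1)
--     d = 0
--     for i, c in enumerate(string):
--         d = ((d << 1) | 1) & masks.get(c, 0)
--         if d & goal:
--             yield string[:i + 1 - m] + replacement + string[i + 1:]
-- ===== Notes on version B (the rewrite author's own statement) =====
-- stated objective: alternative
-- what changed: Replaced repeated str.find substring searches with the bit-parallel shift-and (bitap) algorithm: a dict of per-character bitmasks is built from the pattern once, then one pass over the string updates a single integer automaton state d = ((d<<1)|1) & mask[c] and yields a result whenever the high bit reports a match end.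
import Mathlib
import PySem

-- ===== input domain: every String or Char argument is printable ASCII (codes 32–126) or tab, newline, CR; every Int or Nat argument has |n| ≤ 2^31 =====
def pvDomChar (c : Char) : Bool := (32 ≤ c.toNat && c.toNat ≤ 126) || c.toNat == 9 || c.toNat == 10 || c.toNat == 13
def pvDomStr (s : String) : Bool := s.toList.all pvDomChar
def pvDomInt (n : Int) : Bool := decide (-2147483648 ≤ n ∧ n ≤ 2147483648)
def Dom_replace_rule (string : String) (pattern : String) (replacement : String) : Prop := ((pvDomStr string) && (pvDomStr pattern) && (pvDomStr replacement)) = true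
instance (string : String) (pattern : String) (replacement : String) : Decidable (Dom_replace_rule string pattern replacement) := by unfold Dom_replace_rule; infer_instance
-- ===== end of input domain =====

-- B replaces A's repeated str.find searches by the bit-parallel shift-and (bitap) matcher:
-- per-character bitmasks built from the pattern once, then a single pass over the string
-- updating one integer automaton state (alternative algorithm; A is a generator, ported as
-- the list of its yields).

-- ===== PORT A =====
-- the while loop: start = find(pattern, start); break on -1; yield; start += 1
def pvLoopA (s p r : List Char) (start : Nat) : List String :=
  if _h : start < s.length then
    let f := PySem.Chars.findFrom s p (start : Int)
    if hf : f < 0 then []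
    else
      String.ofList (s.take f.toNat ++ r ++ s.drop (f.toNat + p.length)) ::
        pvLoopA s p r (f.toNat + 1)
  else []
termination_by s.length - start
decreasing_by
  have hspec := PySem.Chars.findFrom_natCast_spec s p start (by omega)
    (by intro h; exact hf (by show PySem.Chars.findFrom s p ↑start < 0; rw [h]; norm_num))
  have : (start : Int) ≤ f := hspec.1
  omega

def replace_rule (string : String) (pattern : String) (replacement : String) : List String :=
  pvLoopA string.toList pattern.toList replacement.toList 0

-- ===== PORT B =====
-- masks[c] = masks.get(c, 0) | (1 << k)  for k, c in enumerate(pattern)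
def pvMasksB : List Char → Nat → PySem.Dict Char Nat → PySem.Dict Char Nat
  | [], _, d => d
  | c :: rest, k, d => pvMasksB rest (k + 1) (d.insert c ((d.getD c 0) ||| (1 <<< k)))

-- for i, c in enumerate(string): d = ((d << 1) | 1) & masks.get(c, 0); if d & goal: yield …
def pvBitapB (s r : List Char) (masks : PySem.Dict Char Nat) (m goal : Nat) :
    List Char → Nat → Nat → List String
  | [], _, _ => []
  | c :: rest, i, d =>
      let d' := ((d <<< 1) ||| 1) &&& masks.getD c 0
      if d' &&& goal ≠ 0 then
        String.ofList (s.take (i + 1 - m) ++ r ++ s.drop (i + 1)) ::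
          pvBitapB s r masks m goal rest (i + 1) d'
      else pvBitapB s r masks m goal rest (i + 1) d'

def replace_rule_alt (string : String) (pattern : String) (replacement : String) : List String :=
  let s := string.toList
  let p := pattern.toList
  let r := replacement.toList
  let m := p.length
  if m = 0 then
    (List.range s.length).map fun i => String.ofList (s.take i ++ r ++ s.drop i)
  else
    let masks := pvMasksB p 0 PySem.Dict.empty
    let goal := 1 <<< (m - 1)
    pvBitapB s r masks m goal s 0 0

-- ===== PRECONDITION & SPEC =====
def Spec_replace_rule (string : String) (pattern : String) (replacement : String) (out : List String) : Prop := out = replace_rule_alt string pattern replacement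
instance (string : String) (pattern : String) (replacement : String) (out : List String) : Decidable (Spec_replace_rule string pattern replacement out) := by unfold Spec_replace_rule; infer_instance

-- ===== CLAIM (what is proved, stated in full; the proofs are below) =====
def Claim_equal_replace_rule : Prop := ∀ (string : String) (pattern : String) (replacement : String), Dom_replace_rule string pattern replacement → Spec_replace_rule string pattern replacement (replace_rule string pattern replacement)

-- ===== LEMMAS AND PROOFS =====

-- the emitted string for a match starting at j
def pvOut (s r : List Char) (m j : Nat) : String :=
  String.ofList (s.take j ++ r ++ s.drop (j + m))

-- A's scan, characterised by match START position
def matchesFrom (s p r : List Char) (start : Nat) : List String :=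
  (List.range' start (s.length - start)).filterMap fun i =>
    if PySem.Chars.startswith (s.drop i) p then some (pvOut s r p.length i) else none

theorem matchesFrom_of_len_le (s p r : List Char) (start : Nat) (h : s.length ≤ start) :
    matchesFrom s p r start = [] := by
  simp [matchesFrom, Nat.sub_eq_zero_of_le h]

theorem matchesFrom_eq_nil_of_no_match (s p r : List Char) (start : Nat)
    (h : ∀ i, start ≤ i → i < s.length → ¬ p <+: s.drop i) :
    matchesFrom s p r start = [] := by
  unfold matchesFrom
  rw [List.filterMap_eq_nil_iff]
  intro i hi
  rw [List.mem_range'_1] at hi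
  have : ¬ p <+: s.drop i := h i hi.1 (by omega)
  simp [PySem.Chars.startswith, List.isPrefixOf_iff_prefix, this]

theorem matchesFrom_step (s p r : List Char) (start j : Nat)
    (hj : start ≤ j) (hjlen : j < s.length)
    (hmatch : p <+: s.drop j)
    (hmin : ∀ i, start ≤ i → i < j → ¬ p <+: s.drop i) :
    matchesFrom s p r start = pvOut s r p.length j :: matchesFrom s p r (j + 1) := by
  unfold matchesFrom
  have hsplit : List.range' start (s.length - start) =
      List.range' start (j - start) ++ j :: List.range' (j + 1) (s.length - (j + 1)) := by
    rw [show s.length - start = (j - start) + (1 + (s.length - (j + 1))) by omega,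
        ← List.range'_append_1]
    congr 1
    rw [show start + (j - start) = j by omega, Nat.add_comm, List.range'_succ]
  rw [hsplit, List.filterMap_append]
  have h1 : (List.range' start (j - start)).filterMap (fun i =>
      if PySem.Chars.startswith (s.drop i) p then some (pvOut s r p.length i) else none) = [] := by
    rw [List.filterMap_eq_nil_iff]
    intro i hi
    rw [List.mem_range'_1] at hi
    have : ¬ p <+: s.drop i := hmin i hi.1 (by omega)
    simp [PySem.Chars.startswith, List.isPrefixOf_iff_prefix, this]
  rw [h1]
  simp [PySem.Chars.startswith, List.isPrefixOf_iff_prefix, hmatch, pvOut]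

theorem loop_eq_matchesFrom (s p r : List Char) (start : Nat) :
    pvLoopA s p r start = matchesFrom s p r start := by
  by_cases h : start < s.length
  · rw [pvLoopA]
    simp only [h, dite_true]
    set f := PySem.Chars.findFrom s p (start : Int) with hf_def
    by_cases hf : f < 0
    · simp only [hf, dite_true]
      have hfm1 : f = -1 := by
        have hn := PySem.Chars.findFrom_natCast s p start (by omega)
        by_cases hz : PySem.Chars.find (s.drop start) p = -1
        · rw [hf_def, hn, if_pos hz]
        · exfalso
          have h1 := PySem.Chars.neg_one_le_find (s.drop start) p
          rw [hf_def, hn, if_neg hz] at hf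
          omega
      have hno : ¬ p <:+: s.drop start :=
        (PySem.Chars.findFrom_natCast_eq_neg_one_iff s p start (by omega)).mp hfm1
      refine (matchesFrom_eq_nil_of_no_match s p r start ?_).symm
      intro i hi _ hpre
      have hdd : s.drop i = (s.drop start).drop (i - start) := by
        rw [List.drop_drop]; congr 1; omega
      rw [hdd] at hpre
      exact hno (hpre.isInfix.trans (List.drop_suffix (i - start) (s.drop start)).isInfix)
    · simp only [hf, dite_false]
      have hne : f ≠ -1 := by intro h'; rw [h'] at hf; exact hf (by norm_num)
      obtain ⟨hge, hpre, hmin⟩ := PySem.Chars.findFrom_natCast_spec s p start (by omega) hne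
      have hge' : start ≤ f.toNat := by omega
      have hflen : f.toNat < s.length := by
        by_cases hp : p = []
        · have : f.toNat ≤ start := by
            by_contra hc
            exact hmin start le_rfl (by omega) (by simp [hp])
          omega
        · have : s.drop f.toNat ≠ [] := by
            intro hnil
            rw [hnil, List.prefix_nil] at hpre
            exact hp hpre
          rw [← List.length_pos_iff, List.length_drop] at this
          omega
      rw [loop_eq_matchesFrom s p r (f.toNat + 1)]
      exact (matchesFrom_step s p r start f.toNat hge' hflen hpre hmin).symm
  · rw [pvLoopA]
    simp only [h, dite_false]
    exact (matchesFrom_of_len_le s p r start (by omega)).symm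
termination_by s.length - start
decreasing_by omega

-- ---- B side: the per-character bitmasks ----

theorem masks_testBit (p : List Char) : ∀ (k0 : Nat) (d0 : PySem.Dict Char Nat) (c : Char) (k : Nat),
    (((pvMasksB p k0 d0).getD c 0).testBit k = true) ↔
      ((∃ j, ∃ _ : j < p.length, p[j] = c ∧ k = k0 + j) ∨ (d0.getD c 0).testBit k = true) := by
  induction p with
  | nil => intro k0 d0 c k; simp [pvMasksB]
  | cons c0 rest ih =>
    intro k0 d0 c k
    rw [pvMasksB, ih]
    have hgd : ((d0.insert c0 ((d0.getD c0 0) ||| (1 <<< k0))).getD c 0) =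
        if c = c0 then (d0.getD c0 0) ||| (1 <<< k0) else d0.getD c 0 :=
      PySem.Dict.getD_insert d0 c0 c _ 0
    rw [hgd]
    constructor
    · rintro (⟨j, hj, hc, hk⟩ | hbit)
      · exact Or.inl ⟨j + 1, by simpa using hj, by simpa using hc, by omega⟩
      · by_cases hcc : c = c0
        · rw [if_pos hcc] at hbit
          rw [Nat.testBit_or] at hbit
          rcases Bool.or_eq_true_iff.mp hbit with h | h
          · subst hcc; exact Or.inr h
          · rw [Nat.shiftLeft_eq, one_mul, Nat.testBit_two_pow] at h
            have : k = k0 := by simp at h; omega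
            exact Or.inl ⟨0, by simp, by simp [hcc], by omega⟩
        · rw [if_neg hcc] at hbit; exact Or.inr hbit
    · rintro (⟨j, hj, hc, hk⟩ | hbit)
      · match j with
        | 0 =>
          simp only [List.getElem_cons_zero] at hc
          refine Or.inr ?_
          rw [if_pos hc.symm, Nat.testBit_or, Nat.shiftLeft_eq, one_mul, Nat.testBit_two_pow]
          simp [hk, hc]
        | j' + 1 =>
          refine Or.inl ⟨j', by simpa using hj, by simpa using hc, by omega⟩
      · by_cases hcc : c = c0
        · refine Or.inr ?_
          rw [if_pos hcc, Nat.testBit_or]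
          subst hcc; simp [hbit]
        · exact Or.inr (by rw [if_neg hcc]; exact hbit)

-- mask bit k set iff the pattern has character c at position k
theorem masks_spec (p : List Char) (c : Char) (k : Nat) :
    (((pvMasksB p 0 PySem.Dict.empty).getD c 0).testBit k = true) ↔
      (p[k]? = some c) := by
  rw [masks_testBit]
  constructor
  · rintro (⟨j, hj, hc, hk⟩ | hbit)
    · subst hk
      simp only [Nat.zero_add]
      rw [List.getElem?_eq_getElem hj, hc]
    · rw [PySem.Dict.getD_empty] at hbit
      simp at hbit
  · intro h
    have hk : k < p.length := by
      by_contra hc2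
      rw [List.getElem?_eq_none (by omega)] at h; simp at h
    refine Or.inl ⟨k, hk, ?_, by omega⟩
    rw [List.getElem?_eq_getElem hk] at h; simpa using h

-- ---- B side: the shift-and automaton invariant ----

theorem append_singleton_suffix (u t : List Char) (a c : Char) :
    u ++ [a] <:+ t ++ [c] ↔ a = c ∧ u <:+ t := by
  rw [← List.reverse_prefix]
  simp only [List.reverse_append, List.reverse_singleton, List.singleton_append,
    List.cons_prefix_cons, List.reverse_prefix]

theorem take_succ_suffix_append (p t : List Char) (c : Char) (k : Nat) (hk : k < p.length) :
    p.take (k + 1) <:+ t ++ [c] ↔ p[k] = c ∧ p.take k <:+ t := by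
  rw [List.take_add_one, List.getElem?_eq_getElem hk]
  simp only [Option.toList_some]
  exact append_singleton_suffix _ _ _ _

theorem and_shift_ne_zero (n j : Nat) : (n &&& (1 <<< j) ≠ 0) ↔ n.testBit j = true := by
  rw [Nat.shiftLeft_eq, one_mul, Nat.and_two_pow]
  rcases h : n.testBit j <;> simp

-- bit k of the automaton state d ↔ p.take (k+1) is a suffix of the processed prefix t
def pvInv (p t : List Char) (d : Nat) : Prop :=
  ∀ k, d.testBit k = true ↔ (k < p.length ∧ p.take (k + 1) <:+ t)

theorem pvInv_step (p t : List Char) (c : Char) (d : Nat) (h : pvInv p t d) :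
    pvInv p (t ++ [c]) (((d <<< 1) ||| 1) &&& (pvMasksB p 0 PySem.Dict.empty).getD c 0) := by
  intro k
  rw [Nat.testBit_and, Bool.and_eq_true, Nat.testBit_or, Bool.or_eq_true_iff, masks_spec]
  constructor
  · rintro ⟨hl, hm⟩
    have hk : k < p.length := by
      by_contra hc2
      rw [List.getElem?_eq_none (by omega)] at hm
      simp at hm
    rw [List.getElem?_eq_getElem hk] at hm
    have hm' : p[k] = c := by simpa using hm
    refine ⟨hk, (take_succ_suffix_append p t c k hk).mpr ⟨hm', ?_⟩⟩
    rcases hl with hd | h1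
    · rw [Nat.testBit_shiftLeft, Bool.and_eq_true] at hd
      obtain ⟨hge, hbit⟩ := hd
      have hge' : 1 ≤ k := by simpa using hge
      have := (h (k - 1)).mp hbit
      have : p.take (k - 1 + 1) <:+ t := this.2
      rwa [show k - 1 + 1 = k by omega] at this
    · have : k = 0 := by
        rw [show (1 : Nat) = 2 ^ 0 by norm_num, Nat.testBit_two_pow] at h1
        simp at h1; omega
      subst this; simp
  · rintro ⟨hk, hsuf⟩
    obtain ⟨hm', htk⟩ := (take_succ_suffix_append p t c k hk).mp hsuf
    refine ⟨?_, by rw [List.getElem?_eq_getElem hk, hm']⟩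
    match k with
    | 0 =>
      refine Or.inr ?_
      rw [show (1 : Nat) = 2 ^ 0 by norm_num, Nat.testBit_two_pow]
      simp
    | k' + 1 =>
      refine Or.inl ?_
      rw [Nat.testBit_shiftLeft]
      have : d.testBit k' = true := (h k').mpr ⟨by omega, by simpa using htk⟩
      simp [this]

-- B's scan, characterised by match END position
def endsFrom (s p r : List Char) (t0 : Nat) : List String :=
  (List.range' t0 (s.length - t0)).filterMap fun i =>
    if p <:+ s.take (i + 1) then some (pvOut s r p.length (i + 1 - p.length)) else none

theorem bitap_eq_endsFrom (s p r : List Char) (hp : p ≠ []) :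
    ∀ (rest t : List Char) (d : Nat), s = t ++ rest → pvInv p t d →
    pvBitapB s r (pvMasksB p 0 PySem.Dict.empty) p.length (1 <<< (p.length - 1))
        rest t.length d = endsFrom s p r t.length := by
  intro rest
  induction rest with
  | nil =>
    intro t d hs _
    rw [pvBitapB]
    have : s.length = t.length := by simp [hs]
    simp [endsFrom, this]
  | cons c rest' ih =>
    intro t d hs hinv
    rw [pvBitapB]
    set d' := ((d <<< 1) ||| 1) &&& (pvMasksB p 0 PySem.Dict.empty).getD c 0 with hd'
    have hinv' : pvInv p (t ++ [c]) d' := pvInv_step p t c d hinv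
    have hlen : t.length < s.length := by simp [hs]
    have htake : s.take (t.length + 1) = t ++ [c] := by
      rw [hs, List.take_append]
      simp
    have hmatch : (d' &&& (1 <<< (p.length - 1)) ≠ 0) ↔ p <:+ s.take (t.length + 1) := by
      rw [htake]
      have hmlt : p.length - 1 < p.length := by
        have : p.length ≠ 0 := fun h => hp (List.length_eq_zero_iff.mp h)
        omega
      rw [and_shift_ne_zero, hinv' (p.length - 1),
        show p.length - 1 + 1 = p.length by omega, List.take_length]
      exact ⟨fun h => h.2, fun h => ⟨hmlt, h⟩⟩
    have hrec := ih (t ++ [c]) d' (by simp [hs]) hinv'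
    have hlen' : (t ++ [c]).length = t.length + 1 := by simp
    rw [hlen'] at hrec
    have hends : endsFrom s p r t.length =
        (if p <:+ s.take (t.length + 1)
          then [pvOut s r p.length (t.length + 1 - p.length)] else []) ++ endsFrom s p r (t.length + 1) := by
      unfold endsFrom
      rw [show s.length - t.length = 1 + (s.length - (t.length + 1)) by omega]
      rw [← List.range'_append_1, List.filterMap_append]
      congr 1
      simp only [List.range'_one, List.filterMap_cons, List.filterMap_nil]
      split_ifs <;> simp
    rw [hends]
    by_cases hm : d' &&& (1 <<< (p.length - 1)) ≠ 0
    · rw [if_pos hm, if_pos (hmatch.mp hm), hrec]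
      have : s.drop (t.length + 1) = s.drop ((t.length + 1 - p.length) + p.length) := by
        congr 1
        have hple : p.length ≤ t.length + 1 := by
          have := hmatch.mp hm
          have hl := List.IsSuffix.length_le this
          rw [htake] at hl; simpa using hl
        omega
      rw [pvOut, this]
      simp
    · rw [if_neg hm, if_neg (fun hc2 => hm (hmatch.mpr hc2)), hrec]
      simp

-- ---- reindexing: the list by match ends equals the list by match starts ----

theorem filterMap_if {α β : Type} (l : List α) (P : α → Prop) [DecidablePred P] (F : α → β) :
    (l.filterMap fun x => if P x then some (F x) else none) =
      (l.filter fun x => decide (P x)).map F := by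
  induction l with
  | nil => simp
  | cons a l ih => by_cases h : P a <;> simp [h, ih]

theorem suffix_take_iff (s p : List Char) (i : Nat) (hi : i < s.length) :
    p <:+ s.take (i + 1) ↔ (p.length ≤ i + 1 ∧ p <+: s.drop (i + 1 - p.length)) := by
  constructor
  · rintro ⟨u, hu⟩
    have hlen : u.length + p.length = i + 1 := by
      have := congrArg List.length hu
      simp [List.length_take] at this
      omega
    have hm : p.length ≤ i + 1 := by omega
    refine ⟨hm, ?_⟩
    have hs : s = u ++ (p ++ s.drop (i + 1)) := by
      conv_lhs => rw [← List.take_append_drop (i + 1) s]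
      rw [← hu]; simp
    have : s.drop u.length = p ++ s.drop (i + 1) := by
      calc s.drop u.length = (u ++ (p ++ s.drop (i + 1))).drop u.length := by rw [← hs]
        _ = p ++ s.drop (i + 1) := by simp
    rw [show i + 1 - p.length = u.length by omega, this]
    exact ⟨s.drop (i + 1), rfl⟩
  · rintro ⟨hm, v, hv⟩
    refine ⟨s.take (i + 1 - p.length), ?_⟩
    set j := i + 1 - p.length with hj
    rw [show i + 1 = j + p.length by omega, List.take_add, ← hv, List.take_left]

theorem prefix_drop_le (s p : List Char) (j : Nat) (hp : p ≠ []) (h : p <+: s.drop j) :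
    j + p.length ≤ s.length := by
  have h1 := h.length_le
  rw [List.length_drop] at h1
  have h2 : p.length ≠ 0 := fun hz => hp (List.length_eq_zero_iff.mp hz)
  omega

theorem ends_eq_matchesFrom (s p r : List Char) (hp : p ≠ []) :
    endsFrom s p r 0 = matchesFrom s p r 0 := by
  have hm1 : 1 ≤ p.length := by
    rcases p with _ | _
    · exact absurd rfl hp
    · simp
  unfold endsFrom matchesFrom
  rw [show List.range' 0 (s.length - 0) = List.range s.length by
    simp [List.range_eq_range']]
  rw [filterMap_if, filterMap_if]
  have key : (List.range s.length).filter (fun i => decide (p <:+ s.take (i + 1))) =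
      ((List.range s.length).filter (fun j => decide (PySem.Chars.startswith (s.drop j) p = true))).map
        (fun j => j + (p.length - 1)) := by
    have hsort1 : (List.range s.length).filter (fun i => decide (p <:+ s.take (i + 1))) |>.Pairwise (· < ·) :=
      List.Pairwise.filter _ (List.pairwise_lt_range)
    have hsort2 : (((List.range s.length).filter (fun j => decide (PySem.Chars.startswith (s.drop j) p = true))).map
        (fun j => j + (p.length - 1))).Pairwise (· < ·) := by
      rw [List.pairwise_map]
      exact (List.Pairwise.filter _ (List.pairwise_lt_range)).imp (by omega)
    have hmem : ∀ i, i ∈ (List.range s.length).filter (fun i => decide (p <:+ s.take (i + 1))) ↔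
        i ∈ ((List.range s.length).filter (fun j => decide (PySem.Chars.startswith (s.drop j) p = true))).map
          (fun j => j + (p.length - 1)) := by
      intro i
      simp only [List.mem_filter, List.mem_range, List.mem_map, decide_eq_true_eq,
        PySem.Chars.startswith_iff]
      constructor
      · rintro ⟨hi, hsuf⟩
        obtain ⟨hle, hpre⟩ := (suffix_take_iff s p i hi).mp hsuf
        exact ⟨i + 1 - p.length, ⟨by omega, hpre⟩, by omega⟩
      · rintro ⟨j, ⟨hj, hpre⟩, rfl⟩
        have hfit := prefix_drop_le s p j hp hpre
        have hi : j + (p.length - 1) < s.length := by omega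
        refine ⟨hi, (suffix_take_iff s p _ hi).mpr ⟨by omega, ?_⟩⟩
        rw [show j + (p.length - 1) + 1 - p.length = j by omega]
        exact hpre
    exact ((List.perm_ext_iff_of_nodup (hsort1.imp (by omega)) (hsort2.imp (by omega))).mpr
      hmem).eq_of_pairwise (fun a b _ _ h1 h2 => absurd h1 (Nat.lt_asymm h2)) hsort1 hsort2
  rw [key, List.map_map]
  apply List.map_congr_left
  intro j _
  simp only [Function.comp_apply]
  congr 1
  omega

-- ---- assembling the two sides ----

theorem matchesFrom_nil_pattern (s r : List Char) :
    matchesFrom s [] r 0 =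
      (List.range s.length).map fun i => String.ofList (s.take i ++ r ++ s.drop i) := by
  unfold matchesFrom
  rw [show List.range' 0 (s.length - 0) = List.range s.length by
    simp [List.range_eq_range']]
  rw [filterMap_if]
  have hsw : ∀ i : Nat, PySem.Chars.startswith (s.drop i) ([] : List Char) = true := by
    intro i; rw [PySem.Chars.startswith_iff]; exact List.nil_prefix
  simp [hsw, pvOut]

theorem pvInv_zero (p : List Char) : pvInv p [] 0 := by
  intro k
  simp only [Nat.zero_testBit, List.suffix_nil]
  constructor
  · intro h; exact absurd h (by simp)
  · rintro ⟨hk, h⟩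
    have := congrArg List.length h
    rw [List.length_take] at this
    simp only [List.length_nil] at this
    omega

-- ===== VERDICT (by name: the statement is the Claim_ definition above) =====
theorem replace_rule_spec : Claim_equal_replace_rule := by
  intro string pattern replacement _
  show replace_rule string pattern replacement = replace_rule_alt string pattern replacement
  rw [replace_rule, loop_eq_matchesFrom]
  simp only [replace_rule_alt]
  by_cases hp : pattern.toList.length = 0
  · rw [if_pos hp]
    have hpe : pattern.toList = [] := List.length_eq_zero_iff.mp hp
    rw [hpe, matchesFrom_nil_pattern]
  · rw [if_neg hp]
    have hpne : pattern.toList ≠ [] := fun h => hp (by rw [h]; rfl)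
    have h0 := bitap_eq_endsFrom string.toList pattern.toList replacement.toList hpne
      string.toList [] 0 rfl (pvInv_zero _)
    simp only [List.length_nil] at h0
    rw [h0, ends_eq_matchesFrom _ _ _ hpne]
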